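-- pv_equiv track=rewrite | github.com/Ismaril/training | Utilities/folder_crawler/folder_crawler.py | _filter_subdirectories
-- ===== SOURCE A (Python) =====
-- def _filter_subdirectories(items):
--     # Sort paths to ensure that shorter paths come before their potential subdirectories
--     items = (x[0] for x in items)
--     sorted_items = sorted(items, key=len)
--
--     filtered_paths = []
--     for i, path in enumerate(sorted_items):
--         path = str(path)
--         # Append a backslash to ensure matching complete directory names
--         if not any(path + '\\' in other for other in sorted_items[i + 1:]):
--             filtered_paths.append(path)
--
--     return filtered_paths
-- ===== SOURCE B (Python) =====
-- def _filter_subdirectories(items):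
--     # One sorted pass + a single NUL-joined haystack: path+chr(92) occurs in some other
--     # (necessarily longer) path iff it occurs in the joined string, since NUL never
--     # appears in the paths and the pattern is longer than any equal-or-shorter path.
--     paths = sorted((x[0] for x in items), key=len)
--     haystack = "\x00".join(paths)
--     return [p for p in paths if (p + "\\") not in haystack]
-- ===== Notes on version B (the rewrite author's own statement) =====
-- stated objective: alternative
-- what changed: Replaces A's per-item scan over the remaining sorted suffix (an O(n) slice copy plus substring tests against every later path, per item) by one NUL-joined haystack string searched once per path, valid because paths contain no NUL and a pattern longer than a path cannot occur in an equal-or-shorter one.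
import Mathlib
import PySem

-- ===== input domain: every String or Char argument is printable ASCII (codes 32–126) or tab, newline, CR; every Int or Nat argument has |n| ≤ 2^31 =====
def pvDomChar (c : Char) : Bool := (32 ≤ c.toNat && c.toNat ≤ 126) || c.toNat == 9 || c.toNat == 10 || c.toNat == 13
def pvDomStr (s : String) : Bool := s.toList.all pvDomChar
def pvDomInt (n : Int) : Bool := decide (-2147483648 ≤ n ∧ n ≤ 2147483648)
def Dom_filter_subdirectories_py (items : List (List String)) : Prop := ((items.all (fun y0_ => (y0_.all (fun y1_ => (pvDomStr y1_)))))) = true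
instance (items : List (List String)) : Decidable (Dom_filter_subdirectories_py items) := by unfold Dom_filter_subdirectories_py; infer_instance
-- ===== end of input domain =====

-- B replaces A's per-item scan over the remaining sorted suffix (an O(n) slice copy
-- plus substring tests against every later path, per item) by one NUL-joined haystack
-- searched once per path — a different algorithm of comparable measured cost.

-- Python's 'a + b' on strings, exact (String.ofList/toList are inverse on the char list)
def pvConcat (a b : String) : String := String.ofList (a.toList ++ b.toList)

-- ===== PORT A =====
def filter_subdirectories_py (items : List (List String)) : List String :=
  let sorted_items := PySem.List.sorted (items.map (fun x => PySem.List.pyGetD x 0 "")) (fun s => PySem.Str.len s)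
  (PySem.List.enumerate sorted_items 0).foldl
    (fun acc ip =>
      if !((PySem.List.slice sorted_items (some (ip.1 + 1)) none).any
            (fun other => PySem.Str.isIn (pvConcat ip.2 "\\") other))
      then acc ++ [ip.2] else acc) []

-- ===== PORT B =====
def filter_subdirectories_py_alt (items : List (List String)) : List String :=
  let paths := PySem.List.sorted (items.map (fun x => PySem.List.pyGetD x 0 "")) (fun s => PySem.Str.len s)
  let haystack := PySem.Str.join "\x00" paths
  paths.filter (fun p => !(PySem.Str.isIn (pvConcat p "\\") haystack))

-- ===== PRECONDITION & SPEC =====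
-- Pre_ excludes only inputs containing an empty inner list, where Python A raises
-- IndexError on x[0] (B raises there too).
def Pre_filter_subdirectories_py (items : List (List String)) : Prop := ∀ x ∈ items, x ≠ []
instance (items : List (List String)) : Decidable (Pre_filter_subdirectories_py items) := by unfold Pre_filter_subdirectories_py; infer_instance
def pvWitness_filter_subdirectories_py : List (List String) := [["C:\\a"], ["C:\\a\\b", "z"], ["C:\\c"]]

def Spec_filter_subdirectories_py (items : List (List String)) (out : List String) : Prop := out = filter_subdirectories_py_alt items
instance (items : List (List String)) (out : List String) : Decidable (Spec_filter_subdirectories_py items out) := by unfold Spec_filter_subdirectories_py; infer_instance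

-- ===== CLAIM (what is proved, stated in full; the proofs are below) =====
def Claim_equal_filter_subdirectories_py : Prop := ∀ (items : List (List String)), Dom_filter_subdirectories_py items → Pre_filter_subdirectories_py items → Spec_filter_subdirectories_py items (filter_subdirectories_py items)

-- ===== LEMMAS AND PROOFS =====

-- a pattern avoiding c that is a prefix of u ++ c :: v is already a prefix of u
lemma pv_prefix_split {p u v : List Char} {c : Char} (hc : c ∉ p)
    (h : p <+: u ++ c :: v) : p <+: u := by
  induction p generalizing u with
  | nil => exact List.nil_prefix
  | cons a t ih =>
    cases u with
    | nil =>
      rw [List.nil_append, List.cons_prefix_cons] at h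
      exact absurd (h.1 ▸ List.mem_cons_self) hc
    | cons x u' =>
      rw [List.cons_append, List.cons_prefix_cons] at h
      exact List.cons_prefix_cons.2 ⟨h.1, ih (fun hm => hc (List.mem_cons_of_mem _ hm)) h.2⟩

-- a pattern avoiding c that is an infix of u ++ c :: v is an infix of u or of v
lemma pv_infix_split {p u v : List Char} {c : Char} (hc : c ∉ p)
    (h : p <:+: u ++ c :: v) : p <:+: u ∨ p <:+: v := by
  induction u with
  | nil =>
    rw [List.nil_append] at h
    rcases List.infix_cons_iff.1 h with hp | hi
    · cases p with
      | nil => exact Or.inl List.nil_infix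
      | cons a t =>
        rw [List.cons_prefix_cons] at hp
        exact absurd (hp.1 ▸ List.mem_cons_self) hc
    · exact Or.inr hi
  | cons x u' ih =>
    rw [List.cons_append] at h
    rcases List.infix_cons_iff.1 h with hp | hi
    · exact Or.inl (pv_prefix_split hc hp).isInfix
    · rcases ih hi with h1 | h2
      · exact Or.inl (h1.trans (List.suffix_cons x u').isInfix)
      · exact Or.inr h2

-- a nonempty pattern avoiding c occurs in the c-joined list iff it occurs in some element
lemma pv_infix_join {c : Char} {p : List Char} (hc : c ∉ p) (hp : p ≠ []) (l : List (List Char)) :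
    p <:+: PySem.Chars.join [c] l ↔ ∃ q ∈ l, p <:+: q := by
  induction l with
  | nil =>
    rw [PySem.Chars.join_nil, List.infix_nil]
    simp [hp]
  | cons a l ih =>
    cases l with
    | nil => simp [PySem.Chars.join_singleton]
    | cons b rest =>
      rw [PySem.Chars.join_cons_cons]
      have hrw : a ++ [c] ++ PySem.Chars.join [c] (b :: rest)
          = a ++ c :: PySem.Chars.join [c] (b :: rest) := by simp
      rw [hrw]
      constructor
      · intro h
        rcases pv_infix_split hc h with h1 | h2
        · exact ⟨a, List.mem_cons_self, h1⟩
        · rcases ih.1 h2 with ⟨q, hq, hqi⟩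
          exact ⟨q, List.mem_cons_of_mem _ hq, hqi⟩
      · rintro ⟨q, hq, hqi⟩
        rcases List.mem_cons.1 hq with rfl | hq'
        · exact hqi.trans ⟨[], c :: PySem.Chars.join [c] (b :: rest), by simp⟩
        · exact (ih.2 ⟨q, hq', hqi⟩).trans ⟨a ++ [c], [], by simp⟩

-- in a length-sorted list, the pattern S[k] ++ ['\'] can only occur past index k
lemma pv_drop_iff (items : List (List String)) (k : Nat)
    (hk : k < (PySem.List.sorted (items.map (fun x => PySem.List.pyGetD x 0 "")) (fun s => PySem.Str.len s)).length) :
    (∃ q ∈ (PySem.List.sorted (items.map (fun x => PySem.List.pyGetD x 0 "")) (fun s => PySem.Str.len s)).drop (k + 1),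
        ((PySem.List.sorted (items.map (fun x => PySem.List.pyGetD x 0 "")) (fun s => PySem.Str.len s))[k].toList ++ ['\\']) <:+: q.toList)
    ↔ (∃ q ∈ (PySem.List.sorted (items.map (fun x => PySem.List.pyGetD x 0 "")) (fun s => PySem.Str.len s)),
        ((PySem.List.sorted (items.map (fun x => PySem.List.pyGetD x 0 "")) (fun s => PySem.Str.len s))[k].toList ++ ['\\']) <:+: q.toList) := by
  constructor
  · rintro ⟨q, hq, hqi⟩
    exact ⟨q, List.mem_of_mem_drop hq, hqi⟩
  · rintro ⟨q, hq, hqi⟩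
    rcases List.getElem_of_mem hq with ⟨j, hj, rfl⟩
    by_cases hjk : j ≤ k
    · exfalso
      have hmono := PySem.List.key_sorted_getElem_mono (items.map (fun x => PySem.List.pyGetD x 0 "")) (fun s => PySem.Str.len s) hjk hk
      have hmono' : (((PySem.List.sorted (items.map (fun x => PySem.List.pyGetD x 0 "")) (fun s => PySem.Str.len s))[j].toList.length : Int))
          ≤ (((PySem.List.sorted (items.map (fun x => PySem.List.pyGetD x 0 "")) (fun s => PySem.Str.len s))[k].toList.length : Int)) := hmono
      have hlen := hqi.length_le
      rw [List.length_append, List.length_singleton] at hlen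
      omega
    · obtain ⟨m, rfl⟩ : ∃ m, j = (k + 1) + m := ⟨j - (k + 1), by omega⟩
      have hm : m < ((PySem.List.sorted (items.map (fun x => PySem.List.pyGetD x 0 "")) (fun s => PySem.Str.len s)).drop (k + 1)).length := by
        rw [List.length_drop]; omega
      have hmem := List.getElem_mem hm
      rw [List.getElem_drop] at hmem
      exact ⟨_, hmem, hqi⟩
lemma pvConcat_toList (a b : String) : (pvConcat a b).toList = a.toList ++ b.toList :=
  String.toList_ofList

-- ===== VERDICT (by name: the statement is the Claim_ definition above) =====
theorem filter_subdirectories_py_spec : Claim_equal_filter_subdirectories_py := by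
  intro items hdom hpre
  unfold Spec_filter_subdirectories_py filter_subdirectories_py filter_subdirectories_py_alt
  simp only []
  set S := PySem.List.sorted (items.map (fun x => PySem.List.pyGetD x 0 "")) (fun s => PySem.Str.len s) with hS
  -- no path contains the NUL character (Dom: printable ASCII / tab / newline / CR)
  have hnul : ∀ s ∈ S, Char.ofNat 0 ∉ s.toList := by
    intro s hs hmem
    have hs' : s ∈ items.map (fun x => PySem.List.pyGetD x 0 "") := by
      rw [hS] at hs
      exact (PySem.List.mem_sorted _ _ _ _).1 hs
    rcases List.mem_map.1 hs' with ⟨x, hx, rfl⟩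
    rw [PySem.List.pyGetD_zero] at hmem
    cases x with
    | nil => simp at hmem
    | cons y ys =>
      simp only [List.getD_cons_zero] at hmem
      unfold Dom_filter_subdirectories_py at hdom
      rw [List.all_eq_true] at hdom
      have := (List.all_eq_true.1 (hdom _ hx)) y List.mem_cons_self
      rw [pvDomStr, List.all_eq_true] at this
      have := this _ hmem
      simp [pvDomChar] at this
  rw [PySem.List.foldl_append_if
        (fun ip : Int × String => !((PySem.List.slice S (some (ip.1 + 1)) none).any
            (fun other => PySem.Str.isIn (pvConcat ip.2 "\\") other)))
        (fun ip : Int × String => ip.2), List.nil_append]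
  have hpoint : ∀ ip ∈ PySem.List.enumerate S 0,
      (!((PySem.List.slice S (some (ip.1 + 1)) none).any
          (fun other => PySem.Str.isIn (pvConcat ip.2 "\\") other)))
      = (!(PySem.Str.isIn (pvConcat ip.2 "\\") (PySem.Str.join "\x00" S))) := by
    intro ip hip
    rcases (PySem.List.mem_enumerate_iff S 0 ip).1 hip with ⟨k, hk, rfl⟩
    simp only
    congr 1
    have hsl : PySem.List.slice S (some ((0 : Int) + (k : Int) + 1)) none = S.drop (k + 1) := by
      rw [PySem.List.slice_from S (by omega)]
      congr 1
      omega
    rw [hsl, Bool.eq_iff_iff, List.any_eq_true]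
    have hpat : (pvConcat S[k] "\\").toList = S[k].toList ++ ['\\'] := by
      rw [pvConcat_toList]; rfl
    have hc : Char.ofNat 0 ∉ S[k].toList ++ ['\\'] := by
      intro hmem
      rcases List.mem_append.1 hmem with h1 | h1
      · exact hnul _ (List.getElem_mem hk) h1
      · simp at h1
    calc (∃ o ∈ S.drop (k + 1), PySem.Str.isIn (pvConcat S[k] "\\") o = true)
        ↔ ∃ o ∈ S.drop (k + 1), (S[k].toList ++ ['\\']) <:+: o.toList := by
          constructor <;> rintro ⟨o, ho, h⟩ <;> refine ⟨o, ho, ?_⟩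
          · rw [PySem.Str.isIn_iff_infix, hpat] at h; exact h
          · rw [PySem.Str.isIn_iff_infix, hpat]; exact h
      _ ↔ ∃ o ∈ S, (S[k].toList ++ ['\\']) <:+: o.toList := pv_drop_iff items k hk
      _ ↔ ∃ ol ∈ S.map String.toList, (S[k].toList ++ ['\\']) <:+: ol := by
          simp only [List.mem_map]
          constructor
          · rintro ⟨o, ho, h⟩; exact ⟨o.toList, ⟨o, ho, rfl⟩, h⟩
          · rintro ⟨ol, ⟨o, ho, rfl⟩, h⟩; exact ⟨o, ho, h⟩
      _ ↔ (S[k].toList ++ ['\\']) <:+: PySem.Chars.join [Char.ofNat 0] (S.map String.toList) :=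
          (pv_infix_join hc (by simp) (S.map String.toList)).symm
      _ ↔ PySem.Str.isIn (pvConcat S[k] "\\") (PySem.Str.join "\x00" S) = true := by
          rw [PySem.Str.isIn_iff_infix, hpat, PySem.Str.toList_join]
          rfl
  rw [List.filter_congr hpoint]
  rw [show (fun ip : Int × String => !(PySem.Str.isIn (pvConcat ip.2 "\\") (PySem.Str.join "\x00" S)))
        = ((fun p => !(PySem.Str.isIn (pvConcat p "\\") (PySem.Str.join "\x00" S))) ∘ (fun ip : Int × String => ip.2)) from rfl,
      ← List.filter_map, PySem.List.map_snd_enumerate]
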